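-- pv_equiv track=rewrite | github.com/subhampanda7000/Subham | CCBP files/python codes/chess board rook game.py | rooks_are_safe
-- ===== SOURCE A (Python) =====
-- def rooks_are_safe(matrix,n):
--   for i in range(0,n):
--     sum=0
--     for j in range(0,n):
--       sum+=matrix[i][j]
--     if sum>1:
--       return 1
--   for i in range(0,n):
--     sum=0
--     for j in range(0,n):
--       sum+=matrix[j][i]
--     if sum>1:
--       return 1
--   if sum<=1:
--     return 0
-- ===== SOURCE B (Python) =====
-- def rooks_are_safe(matrix, n):
--     # Single pass: accumulate column totals and a bad-row flag together;
--     # never scans the matrix column-major.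
--     cols = [0] * n
--     row_bad = False
--     for i in range(0, n):
--         total = 0
--         for j in range(0, n):
--             v = matrix[i][j]
--             total += v
--             cols[j] += v
--         if total > 1:
--             row_bad = True
--     if row_bad:
--         return 1
--     if max(cols) > 1:
--         return 1
--     return 0
-- ===== Notes on version B (the rewrite author's own statement) =====
-- stated objective: alternative
-- what changed: A scans the matrix twice (row-major for row sums, then column-major for column sums) with early returns; B makes one row-major pass that accumulates all column totals in a tally array while flagging bad rows, then checks the tallies.
-- outside the precondition, e.g. on rooks_are_safe([[2, 0], [0]], 2): A returns 1, B raises IndexError; on rooks_are_safe([[1]], 0): A raises NameError, B raises ValueError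
import Mathlib
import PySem

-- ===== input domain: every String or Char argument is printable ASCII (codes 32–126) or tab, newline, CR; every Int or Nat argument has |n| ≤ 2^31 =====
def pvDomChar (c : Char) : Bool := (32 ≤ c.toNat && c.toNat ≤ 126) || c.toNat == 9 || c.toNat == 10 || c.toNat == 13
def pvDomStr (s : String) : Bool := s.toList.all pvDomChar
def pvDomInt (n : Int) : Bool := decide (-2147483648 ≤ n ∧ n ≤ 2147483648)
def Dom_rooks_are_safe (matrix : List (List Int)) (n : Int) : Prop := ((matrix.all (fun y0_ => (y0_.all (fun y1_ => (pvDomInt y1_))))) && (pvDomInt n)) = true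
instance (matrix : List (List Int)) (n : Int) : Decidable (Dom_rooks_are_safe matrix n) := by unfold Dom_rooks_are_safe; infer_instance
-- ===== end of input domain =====

-- B replaces A's two separate row-major and column-major scans by one row-major pass
-- that accumulates column totals alongside the row checks (alternative decomposition, same cost).

-- ===== PORT A =====
-- sum over j in range(0, n) of matrix[i][j]
def pvRowSumA (matrix : List (List Int)) (n i : Int) : Int :=
  (PySem.List.pyRange 0 n 1).foldl
    (fun s j => s + PySem.List.pyGetD (PySem.List.pyGetD matrix i []) j 0) 0

-- sum over j in range(0, n) of matrix[j][i]
def pvColSumA (matrix : List (List Int)) (n i : Int) : Int :=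
  (PySem.List.pyRange 0 n 1).foldl
    (fun s j => s + PySem.List.pyGetD (PySem.List.pyGetD matrix j []) i 0) 0

-- A's second loop; `last` is the value of Python's `sum` variable when the loop is entered.
-- At the fall-through Python runs `if sum<=1: return 0` and otherwise returns None; the None
-- branch is unreachable for n ≥ 1 (a completed column loop left sum ≤ 1), so both arms are 0.
def pvColLoopA (matrix : List (List Int)) (n : Int) (last : Int) : List Int → Int
  | [] => if last ≤ 1 then 0 else 0
  | i :: rest =>
      let s := pvColSumA matrix n i
      if s > 1 then 1 else pvColLoopA matrix n s rest

-- A's first loop, carrying Python's `sum` variable into the second loop.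
def pvRowLoopA (matrix : List (List Int)) (n : Int) (last : Int) : List Int → Int
  | [] => pvColLoopA matrix n last (PySem.List.pyRange 0 n 1)
  | i :: rest =>
      let s := pvRowSumA matrix n i
      if s > 1 then 1 else pvRowLoopA matrix n s rest

def rooks_are_safe (matrix : List (List Int)) (n : Int) : Int :=
  pvRowLoopA matrix n 0 (PySem.List.pyRange 0 n 1)

-- ===== PORT B =====
def rooks_are_safe_alt (matrix : List (List Int)) (n : Int) : Int :=
  let st := (PySem.List.pyRange 0 n 1).foldl
    (fun (st : List Int × Bool) i =>
      let inner := (PySem.List.pyRange 0 n 1).foldl          -- for j in range(0, n):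
        (fun (tc : Int × List Int) j =>
          let v := PySem.List.pyGetD (PySem.List.pyGetD matrix i []) j 0   -- v = matrix[i][j]
          (tc.1 + v,                                                        -- total += v
           PySem.List.pySetD tc.2 j (PySem.List.pyGetD tc.2 j 0 + v)))     -- cols[j] += v
        ((0 : Int), st.1)
      (inner.2, st.2 || decide (inner.1 > 1)))               -- if total > 1: row_bad = True
    (List.replicate n.toNat 0, false)                        -- cols = [0]*n, row_bad = False
  if st.2 then 1
  else if decide ((PySem.List.max? st.1 id).getD 0 > 1) then 1 else 0    -- if max(cols) > 1

-- ===== PRECONDITION & SPEC =====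
-- Pre_ excludes n < 1 (Python A raises NameError: `sum` unassigned) and matrices without a
-- full n×n block (A raises IndexError there, except when an earlier bad row already made A
-- return 1 before touching the short row — those few returning inputs are excluded too).
def Pre_rooks_are_safe (matrix : List (List Int)) (n : Int) : Prop :=
  1 ≤ n ∧ n ≤ (matrix.length : Int) ∧ ∀ row ∈ matrix.take n.toNat, n ≤ (row.length : Int)
instance (matrix : List (List Int)) (n : Int) : Decidable (Pre_rooks_are_safe matrix n) := by
  unfold Pre_rooks_are_safe; infer_instance

def pvWitness_rooks_are_safe : List (List Int) × Int := ([[1, 0], [0, 1]], 2)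

def Spec_rooks_are_safe (matrix : List (List Int)) (n : Int) (out : Int) : Prop := out = rooks_are_safe_alt matrix n
instance (matrix : List (List Int)) (n : Int) (out : Int) : Decidable (Spec_rooks_are_safe matrix n out) := by unfold Spec_rooks_are_safe; infer_instance

-- ===== CLAIM (what is proved, stated in full; the proofs are below) =====
def Claim_equal_rooks_are_safe : Prop := ∀ (matrix : List (List Int)) (n : Int), Dom_rooks_are_safe matrix n → Pre_rooks_are_safe matrix n → Spec_rooks_are_safe matrix n (rooks_are_safe matrix n)

-- ===== LEMMAS AND PROOFS =====

-- any list is the range-map of its own getD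
lemma pv_eq_map_range_getD (l : List Int) : l = (List.range l.length).map (fun j => l.getD j 0) := by
  apply List.ext_getElem
  · simp
  · intro i h1 h2
    simp [List.getD_eq_getElem?_getD, List.getElem?_eq_getElem h1]

lemma pv_getD_set (cs : List Int) (j : Nat) (v : Int) (c : Nat) (hj : j < cs.length) :
    (cs.set j v).getD c 0 = if c = j then v else cs.getD c 0 := by
  rcases eq_or_ne c j with rfl | hne
  · simp only [List.getD_eq_getElem?_getD]
    rw [List.getElem?_set_self (by simpa using hj)]; rfl
  · simp [List.getD_eq_getElem?_getD, List.getElem?_set_ne (Ne.symm hne), hne]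

-- Python's max of a nonempty list, via max?'s fold
lemma pv_max_aux : ∀ (cs : List Int) (m : Int), PySem.List.max? (m :: cs) id = some (cs.foldl max m) := by
  intro cs
  induction cs with
  | nil => intro m; rfl
  | cons d cs ih =>
      intro m
      have step : PySem.List.max? (m :: d :: cs) id = PySem.List.max? (max m d :: cs) id := by
        unfold PySem.List.max?
        simp only [List.foldl_cons]
        congr 1
        rcases le_total m d with h | h <;> simp [h, id] <;> omega
      rw [step, ih, List.foldl_cons]

lemma pv_foldl_max_gt : ∀ (cs : List Int) (c : Int),
    decide (cs.foldl max c > 1) = (c :: cs).any (fun x => decide (x > 1)) := by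
  intro cs
  induction cs with
  | nil => intro c; simp
  | cons d cs ih =>
      intro c
      rw [List.foldl_cons, ih]
      simp only [List.any_cons]
      have hmax : decide (max c d > 1) = (decide (c > 1) || decide (d > 1)) := by
        rcases le_total c d with h | h <;> simp [h] <;> omega
      rw [hmax, Bool.or_assoc]

-- `max(l) > 1` is `any(c > 1 for c in l)` on a nonempty list
lemma pv_max_any (l : List Int) (h : l ≠ []) :
    decide ((PySem.List.max? l id).getD 0 > 1) = l.any (fun c => decide (c > 1)) := by
  cases l with
  | nil => exact absurd rfl h
  | cons c cs =>
      rw [pv_max_aux cs c]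
      show decide (cs.foldl max c > 1) = _
      exact pv_foldl_max_gt cs c

-- A's loops, characterised
lemma pv_colLoopA_eq (matrix : List (List Int)) (n : Int) :
    ∀ (is : List Int) (last : Int),
      pvColLoopA matrix n last is =
        if is.any (fun i => decide (pvColSumA matrix n i > 1)) then 1 else 0 := by
  intro is
  induction is with
  | nil => intro last; simp only [pvColLoopA, List.any_nil, Bool.false_eq_true, if_false]; split <;> rfl
  | cons i rest ih =>
      intro last
      simp only [pvColLoopA, List.any_cons]
      by_cases h : pvColSumA matrix n i > 1 <;> simp [h, ih]

lemma pv_rowLoopA_eq (matrix : List (List Int)) (n : Int) :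
    ∀ (is : List Int) (last : Int),
      pvRowLoopA matrix n last is =
        if is.any (fun i => decide (pvRowSumA matrix n i > 1)) then 1
        else if (PySem.List.pyRange 0 n 1).any (fun i => decide (pvColSumA matrix n i > 1)) then 1 else 0 := by
  intro is
  induction is with
  | nil => intro last; simp [pvRowLoopA, pv_colLoopA_eq]
  | cons i rest ih =>
      intro last
      simp only [pvRowLoopA, List.any_cons]
      by_cases h : pvRowSumA matrix n i > 1 <;> simp [h, ih]

-- B's inner loop: the running total and the tally updates, separated
lemma pv_inner (row : Nat → Int) :
    ∀ (js : List Nat) (t : Int) (cs : List Int),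
      js.foldl (fun (tc : Int × List Int) j =>
          (tc.1 + row j, tc.2.set j (tc.2.getD j 0 + row j))) (t, cs) =
        (t + (js.map row).sum,
         js.foldl (fun cs j => cs.set j (cs.getD j 0 + row j)) cs) := by
  intro js
  induction js with
  | nil => simp
  | cons j rest ih =>
      intro t cs
      rw [List.foldl_cons, ih, List.map_cons, List.sum_cons, add_assoc]
      rfl

-- sequential in-place adds at distinct in-range positions, as a map
lemma pv_set_fold (row : Nat → Int) :
    ∀ (js : List Nat) (cs : List Int), js.Nodup → (∀ j ∈ js, j < cs.length) →
      js.foldl (fun cs j => cs.set j (cs.getD j 0 + row j)) cs =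
        (List.range cs.length).map (fun c => cs.getD c 0 + if c ∈ js then row c else 0) := by
  intro js
  induction js with
  | nil =>
      intro cs _ _
      simp only [List.foldl_nil, List.not_mem_nil, if_false, add_zero]
      exact pv_eq_map_range_getD cs
  | cons j rest ih =>
      intro cs hnd hlt
      have hj : j < cs.length := hlt j (by simp)
      have hlen : (cs.set j (cs.getD j 0 + row j)).length = cs.length := by simp
      rw [List.foldl_cons,
          ih _ (List.Nodup.of_cons hnd) (fun x hx => by rw [hlen]; exact hlt x (List.mem_cons_of_mem _ hx)),
          hlen]
      apply List.map_congr_left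
      intro c hc
      have hjr : j ∉ rest := (List.nodup_cons.mp hnd).1
      rw [pv_getD_set cs j _ c hj]
      rcases eq_or_ne c j with rfl | hne
      · simp [hjr]
      · simp [hne, List.mem_cons]

-- B's outer loop: tally vector and bad-row flag after processing rows `is`
lemma pv_outer (matrix : List (List Int)) (k : Nat) :
    ∀ (is : List Nat) (cs : List Int) (b : Bool), cs.length = k →
      is.foldl (fun (st : List Int × Bool) i =>
          ((((List.range k).foldl (fun (tc : Int × List Int) j =>
              (tc.1 + (matrix.getD i []).getD j 0,
               tc.2.set j (tc.2.getD j 0 + (matrix.getD i []).getD j 0))) ((0 : Int), st.1))).2,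
           st.2 || decide ((((List.range k).foldl (fun (tc : Int × List Int) j =>
              (tc.1 + (matrix.getD i []).getD j 0,
               tc.2.set j (tc.2.getD j 0 + (matrix.getD i []).getD j 0))) ((0 : Int), st.1))).1 > 1)))
        (cs, b) =
      ((List.range k).map (fun c => cs.getD c 0 +
          (is.map (fun i => (matrix.getD i []).getD c 0)).sum),
       b || is.any (fun i =>
          decide (((List.range k).map (fun j => (matrix.getD i []).getD j 0)).sum > 1))) := by
  intro is
  induction is with
  | nil =>
      intro cs b hlen
      simp only [List.foldl_nil, List.map_nil, List.sum_nil, add_zero, List.any_nil, Bool.or_false]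
      subst hlen
      rw [← pv_eq_map_range_getD cs]
  | cons i rest ih =>
      intro cs b hlen
      rw [List.foldl_cons,
          pv_inner (fun j => (matrix.getD i []).getD j 0) (List.range k) 0 cs,
          pv_set_fold (fun j => (matrix.getD i []).getD j 0) (List.range k) cs
            List.nodup_range (fun j hj => by rw [hlen]; exact List.mem_range.mp hj)]
      have hcs' : (List.range cs.length).map
            (fun c => cs.getD c 0 + if c ∈ List.range k then (matrix.getD i []).getD c 0 else 0) =
          (List.range k).map (fun c => cs.getD c 0 + (matrix.getD i []).getD c 0) := by
        rw [hlen]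
        apply List.map_congr_left
        intro c hc
        simp [List.mem_range.mp hc]
      rw [hcs', ih _ _ (by simp)]
      refine Prod.ext ?_ ?_
      · apply List.map_congr_left
        intro c hc
        have hck := List.mem_range.mp hc
        rw [PySem.List.getD_map_range _ _ _ _ hck]
        simp [add_assoc]
      · simp [Bool.or_assoc, zero_add]

-- ===== VERDICT (by name: the statement is the Claim_ definition above) =====
theorem rooks_are_safe_spec : Claim_equal_rooks_are_safe := by
  intro matrix n _hdom hpre
  unfold Spec_rooks_are_safe rooks_are_safe rooks_are_safe_alt
  set k := n.toNat with hk
  have hrange : PySem.List.pyRange 0 n 1 = List.map (fun j : Nat => (j : Int)) (List.range k) := by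
    rw [PySem.List.pyRange_one]
    simp only [zero_add, sub_zero]
    rw [hk]
  have hrowsum : ∀ i : Nat, pvRowSumA matrix n (i : Int) =
      ((List.range k).map (fun j => (matrix.getD i []).getD j 0)).sum := by
    intro i
    unfold pvRowSumA
    rw [hrange, List.foldl_map]
    simp only [PySem.List.pyGetD_natCast]
    rw [PySem.List.foldl_add, zero_add]
  have hcolsum : ∀ c : Nat, pvColSumA matrix n (c : Int) =
      ((List.range k).map (fun j => (matrix.getD j []).getD c 0)).sum := by
    intro c
    unfold pvColSumA
    rw [hrange, List.foldl_map]
    simp only [PySem.List.pyGetD_natCast]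
    rw [PySem.List.foldl_add, zero_add]
  -- characterise A
  rw [pv_rowLoopA_eq]
  -- normalise B's folds to Nat indices
  dsimp only
  rw [hrange]
  simp only [List.foldl_map, PySem.List.pyGetD_natCast, PySem.List.pySetD_natCast]
  rw [pv_outer matrix k (List.range k) (List.replicate k 0) false (by simp)]
  simp only [Bool.false_or]
  -- the row conditions agree
  have hrow : (List.map (fun j : Nat => (j : Int)) (List.range k)).any
        (fun i => decide (pvRowSumA matrix n i > 1)) =
      (List.range k).any (fun i =>
        decide (((List.range k).map (fun j => (matrix.getD i []).getD j 0)).sum > 1)) := by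
    rw [List.any_map]
    apply PySem.List.any_congr_mem
    intro i _
    simp only [Function.comp_apply]
    rw [hrowsum i]
  -- the column tallies have the column sums
  have hcols : (List.range k).map (fun c => (List.replicate k (0:Int)).getD c 0 +
        ((List.range k).map (fun j => (matrix.getD j []).getD c 0)).sum) =
      (List.range k).map (fun c => ((List.range k).map (fun j => (matrix.getD j []).getD c 0)).sum) := by
    apply List.map_congr_left
    intro c _
    have h0 : (List.replicate k (0:Int)).getD c 0 = 0 := by
      simp [List.getD_eq_getElem?_getD]
    rw [h0, zero_add]
  -- the column conditions agree
  have hcol : (List.map (fun j : Nat => (j : Int)) (List.range k)).any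
        (fun i => decide (pvColSumA matrix n i > 1)) =
      ((List.range k).map (fun c =>
          ((List.range k).map (fun j => (matrix.getD j []).getD c 0)).sum)).any
        (fun c => decide (c > 1)) := by
    rw [List.any_map, List.any_map]
    apply PySem.List.any_congr_mem
    intro c _
    simp only [Function.comp_apply]
    rw [hcolsum c]
  have hne : (List.range k).map (fun c =>
      ((List.range k).map (fun j => (matrix.getD j []).getD c 0)).sum) ≠ [] := by
    have hkpos : 0 < k := by
      obtain ⟨h1, -, -⟩ := hpre
      omega
    simp only [ne_eq, List.map_eq_nil_iff, List.range_eq_nil]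
    omega
  rw [hrow, hcols, pv_max_any _ hne, hcol]
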